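-- pv_equiv track=rewrite | github.com/TakashiSasaki/recycle.moukaeritai.work | src/jbrc_scraper/cli.py | resolve_categories
-- ===== SOURCE A (Python) =====
-- from typing import Iterable, List, Mapping, Sequence, Tuple
--
-- ACCEPTABLE_CATEGORY_VALUES = "1,2,general,bicycle"
--
-- def resolve_categories(selected_categories: Sequence[str] | None) -> List[str]:
--     alias_map: Mapping[str, str] = {
--         "1": "1",
--         "general": "1",
--         "2": "2",
--         "bicycle": "2",
--     }
--     if not selected_categories:
--         return ["1", "2"]
--
--     resolved: List[str] = []
--     seen: set[str] = set()
--     for raw_value in selected_categories: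
--         normalized = raw_value.strip().lower()
--         category_id = alias_map.get(normalized)
--         if category_id is None:
--             raise ValueError(
--                 f"不正な --category 値: {raw_value!r}. "
--                 f"受理可能値: {ACCEPTABLE_CATEGORY_VALUES}"
--             )
--         if category_id in seen:
--             continue
--         seen.add(category_id)
--         resolved.append(category_id)
--     return resolved
-- ===== SOURCE B (Python) =====
-- ACCEPTABLE_CATEGORY_VALUES = "1,2,general,bicycle"
--
-- _ALIASES_ONE = ("1", "general")
-- _ALIASES_TWO = ("2", "bicycle")
--
-- def resolve_categories(selected_categories):
--     # Exploits the two-id codomain: instead of building a list and deduplicating,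
--     # record the first position at which each of the two category ids appears,
--     # then assemble the answer by comparing those positions.
--     if not selected_categories:
--         return ["1", "2"]
--     first_one = None
--     first_two = None
--     for i, raw_value in enumerate(selected_categories):
--         normalized = raw_value.strip().lower()
--         if normalized in _ALIASES_ONE:
--             if first_one is None:
--                 first_one = i
--         elif normalized in _ALIASES_TWO:
--             if first_two is None:
--                 first_two = i
--         else:
--             raise ValueError(
--                 f"不正な --category 値: {raw_value!r}. "
--                 f"受理可能値: {ACCEPTABLE_CATEGORY_VALUES}"
--             )
--     if first_one is None:
--         return [] if first_two is None else ["2"]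
--     if first_two is None:
--         return ["1"]
--     return ["1", "2"] if first_one < first_two else ["2", "1"]
-- ===== Notes on version B (the rewrite author's own statement) =====
-- stated objective: alternative
-- what changed: Instead of building a resolved list with a seen set, B exploits the two-id codomain: one scan records the first position at which id '1' and id '2' each appear, and the result is assembled at the end by comparing those two positions.
import Mathlib
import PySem

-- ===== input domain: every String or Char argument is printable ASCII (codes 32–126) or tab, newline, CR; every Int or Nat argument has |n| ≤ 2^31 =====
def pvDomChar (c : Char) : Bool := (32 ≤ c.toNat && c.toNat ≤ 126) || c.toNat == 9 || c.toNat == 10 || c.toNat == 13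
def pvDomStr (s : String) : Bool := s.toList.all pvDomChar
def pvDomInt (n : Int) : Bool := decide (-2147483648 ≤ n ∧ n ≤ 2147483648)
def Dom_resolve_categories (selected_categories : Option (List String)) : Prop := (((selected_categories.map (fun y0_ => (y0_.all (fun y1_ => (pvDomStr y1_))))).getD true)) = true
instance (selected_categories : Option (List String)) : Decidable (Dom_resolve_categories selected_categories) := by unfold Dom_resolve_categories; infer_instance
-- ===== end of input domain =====

-- B replaces A's validate-and-dedup loop (resolved list + seen set) by a scan that
-- records the FIRST POSITION at which each of the two category ids appears and then
-- assembles the answer by comparing those positions (possible because the codomain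
-- has exactly two ids). Objective: alternative decomposition, same cost.
-- Equivalence is about the return value on inputs where A returns (Pre_ excludes the
-- inputs with an unknown alias, on which A raises ValueError).

-- shared helper: raw_value.strip().lower()
def pvNorm (s : String) : String := PySem.Str.lower (PySem.Str.strip s)

-- ===== PORT A =====
-- the alias dict literal of A
def pvAliasMap : PySem.Dict String String :=
  PySem.Dict.ofList [("1", "1"), ("general", "1"), ("2", "2"), ("bicycle", "2")]

-- A's loop: resolved list + seen set, skipping already-seen ids.
-- On an unknown alias Python raises ValueError (excluded by Pre_); the port returns the list so far.
def pvLoopA : List String → List String → PySem.Set String → List String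
  | [], resolved, _ => resolved
  | raw :: rest, resolved, seen =>
    match pvAliasMap.get? (pvNorm raw) with
    | none => resolved
    | some cid =>
      if PySem.Set.contains seen cid then pvLoopA rest resolved seen
      else pvLoopA rest (resolved ++ [cid]) (PySem.Set.add seen cid)

def resolve_categories (selected_categories : Option (List String)) : List String :=
  match selected_categories with
  | none => ["1", "2"]
  | some xs => if xs = [] then ["1", "2"] else pvLoopA xs [] PySem.Set.empty

-- ===== PORT B =====
-- B's loop: first occurrence position of id "1" and of id "2" (first_one, first_two).
-- On an unknown alias Python raises ValueError (excluded by Pre_); the port stops there.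
def pvScanB : List String → Int → Option Int → Option Int → Option Int × Option Int
  | [], _, p1, p2 => (p1, p2)
  | raw :: rest, i, p1, p2 =>
    let normalized := pvNorm raw
    if normalized = "1" ∨ normalized = "general" then
      pvScanB rest (i + 1) (if p1 = none then some i else p1) p2
    else if normalized = "2" ∨ normalized = "bicycle" then
      pvScanB rest (i + 1) p1 (if p2 = none then some i else p2)
    else (p1, p2)

-- B's final if-chain assembling the answer from the two positions
def pvAssemble : Option Int → Option Int → List String
  | none, none => []
  | none, some _ => ["2"]
  | some _, none => ["1"]
  | some a, some b => if a < b then ["1", "2"] else ["2", "1"]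

def resolve_categories_alt (selected_categories : Option (List String)) : List String :=
  match selected_categories with
  | none => ["1", "2"]
  | some xs =>
    if xs = [] then ["1", "2"]
    else
      let st := pvScanB xs 0 none none
      pvAssemble st.1 st.2

-- ===== PRECONDITION & SPEC =====
-- Pre_ excludes exactly the inputs with an alias outside the map, where A raises ValueError.
def Pre_resolve_categories (selected_categories : Option (List String)) : Prop :=
  match selected_categories with
  | none => True
  | some xs => ∀ s ∈ xs, pvNorm s ∈ ["1", "general", "2", "bicycle"]

instance (selected_categories : Option (List String)) : Decidable (Pre_resolve_categories selected_categories) := by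
  unfold Pre_resolve_categories; cases selected_categories <;> infer_instance

def pvWitness_resolve_categories : Option (List String) := some ["General", " 2 ", "bicycle", "1"]

def Spec_resolve_categories (selected_categories : Option (List String)) (out : List String) : Prop := out = resolve_categories_alt selected_categories
instance (selected_categories : Option (List String)) (out : List String) : Decidable (Spec_resolve_categories selected_categories out) := by unfold Spec_resolve_categories; infer_instance

-- ===== CLAIM (what is proved, stated in full; the proofs are below) =====
def Claim_equal_resolve_categories : Prop := ∀ (selected_categories : Option (List String)), Dom_resolve_categories selected_categories → Pre_resolve_categories selected_categories → Spec_resolve_categories selected_categories (resolve_categories selected_categories)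

-- ===== LEMMAS AND PROOFS =====

-- main invariant: A's loop run with resolved = seen = the list assembled from B's
-- current positions equals the assembly of B's final positions (positions already
-- recorded are strictly below the current index i).
set_option maxHeartbeats 1000000 in
theorem pvLoop_eq_scan (xs : List String)
    (hv : ∀ s ∈ xs, pvNorm s ∈ ["1", "general", "2", "bicycle"]) :
    ∀ (i : Int) (p1 p2 : Option Int),
      (∀ a, p1 = some a → a < i) → (∀ b, p2 = some b → b < i) →
      pvLoopA xs (pvAssemble p1 p2) (pvAssemble p1 p2)
        = pvAssemble (pvScanB xs i p1 p2).1 (pvScanB xs i p1 p2).2 := by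
  induction xs with
  | nil => intro i p1 p2 _ _; rfl
  | cons raw rest ih =>
    intro i p1 p2 h1 h2
    have hrest : ∀ s ∈ rest, pvNorm s ∈ ["1", "general", "2", "bicycle"] :=
      fun s hs => hv s (List.mem_cons_of_mem _ hs)
    have hd := hv raw (List.mem_cons_self ..)
    simp only [List.mem_cons, List.not_mem_nil, or_false] at hd
    have hstep : (pvNorm raw = "1" ∨ pvNorm raw = "general") ∨
                 (pvNorm raw = "2" ∨ pvNorm raw = "bicycle") := by
      rcases hd with h | h | h | h
      · exact Or.inl (Or.inl h)
      · exact Or.inl (Or.inr h)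
      · exact Or.inr (Or.inl h)
      · exact Or.inr (Or.inr h)
    rcases hstep with hn | hn
    · -- alias of id "1"
      have hget : pvAliasMap.get? (pvNorm raw) = some "1" := by
        rcases hn with h | h <;> rw [h] <;> decide
      have hB : pvScanB (raw :: rest) i p1 p2
          = pvScanB rest (i + 1) (if p1 = none then some i else p1) p2 := by
        rcases hn with h | h <;> simp [pvScanB, h]
      rw [hB]
      simp only [pvLoopA, hget]
      rcases p1 with _ | a
      · -- first occurrence of "1"
        have hc : PySem.Set.contains (pvAssemble none p2) "1" = false := by
          rcases p2 with _ | b <;> simp only [pvAssemble] <;> decide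
        have hadd : PySem.Set.add (pvAssemble (none : Option Int) p2) "1"
            = pvAssemble (some i) p2 := by
          rcases p2 with _ | b
          · rfl
          · have hbi : ¬ i < b := by have := h2 b rfl; omega
            simp only [PySem.Set.add, pvAssemble, hbi]
            rfl
        have happ : pvAssemble (none : Option Int) p2 ++ ["1"] = pvAssemble (some i) p2 := by
          rw [← hadd]; simp only [PySem.Set.add, hc, Bool.false_eq_true, if_false]
        rw [hc]
        simp only [Bool.false_eq_true, if_false, reduceIte, happ, hadd]
        exact ih hrest (i + 1) (some i) p2
          (fun x hx => by cases hx; omega)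
          (fun b hb => by have := h2 b hb; omega)
      · -- "1" already seen
        have hc : PySem.Set.contains (pvAssemble (some a) p2) "1" = true := by
          rcases p2 with _ | b
          · simp only [pvAssemble]; decide
          · simp only [pvAssemble]
            by_cases hab : a < b <;> simp [hab]
        rw [hc]
        simp only [if_true]
        exact ih hrest (i + 1) (some a) p2
          (fun x hx => by cases hx; have := h1 a rfl; omega)
          (fun b hb => by have := h2 b hb; omega)
    · -- alias of id "2"
      have hget : pvAliasMap.get? (pvNorm raw) = some "2" := by
        rcases hn with h | h <;> rw [h] <;> decide
      have hB : pvScanB (raw :: rest) i p1 p2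
          = pvScanB rest (i + 1) p1 (if p2 = none then some i else p2) := by
        rcases hn with h | h <;> simp [pvScanB, h]
      rw [hB]
      simp only [pvLoopA, hget]
      rcases p2 with _ | b
      · -- first occurrence of "2"
        have hc : PySem.Set.contains (pvAssemble p1 none) "2" = false := by
          rcases p1 with _ | a <;> simp only [pvAssemble] <;> decide
        have hadd : PySem.Set.add (pvAssemble p1 (none : Option Int)) "2"
            = pvAssemble p1 (some i) := by
          rcases p1 with _ | a
          · rfl
          · have hai : a < i := h1 a rfl
            simp only [PySem.Set.add, pvAssemble, hai]
            rfl
        have happ : pvAssemble p1 (none : Option Int) ++ ["2"] = pvAssemble p1 (some i) := by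
          rw [← hadd]; simp only [PySem.Set.add, hc, Bool.false_eq_true, if_false]
        rw [hc]
        simp only [Bool.false_eq_true, if_false, reduceIte, happ, hadd]
        exact ih hrest (i + 1) p1 (some i)
          (fun a ha => by have := h1 a ha; omega)
          (fun x hx => by cases hx; omega)
      · -- "2" already seen
        have hc : PySem.Set.contains (pvAssemble p1 (some b)) "2" = true := by
          rcases p1 with _ | a
          · simp only [pvAssemble]; decide
          · simp only [pvAssemble]
            by_cases hab : a < b <;> simp [hab]
        rw [hc]
        simp only [if_true]
        exact ih hrest (i + 1) p1 (some b)
          (fun a ha => by have := h1 a ha; omega)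
          (fun x hx => by cases hx; have := h2 b rfl; omega)

-- ===== VERDICT (by name: the statement is the Claim_ definition above) =====
theorem resolve_categories_spec : Claim_equal_resolve_categories := by
  intro sc _ hpre
  unfold Spec_resolve_categories
  cases sc with
  | none => rfl
  | some xs =>
    unfold resolve_categories resolve_categories_alt
    by_cases hx : xs = []
    · simp [hx]
    · simp only [if_neg hx]
      exact pvLoop_eq_scan xs hpre 0 none none
        (fun a ha => by cases ha) (fun b hb => by cases hb)
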